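-- pv_equiv track=rewrite | github.com/lazy-fortran/testboard | tools/embed_templates.py | format_int8_array
-- ===== SOURCE A (Python) =====
-- PER_LINE = 12
--
-- def format_int8_array(values: list[int]) -> list[str]:
--     if not values:
--         return ['        0 ]']
--
--     lines: list[str] = []
--     chunk: list[str] = []
--     total = len(values)
--
--     for idx, value in enumerate(values):
--         chunk.append(f"{value:>4d}")
--         is_last = idx == total - 1
--         chunk_full = (idx % PER_LINE == PER_LINE - 1) or is_last
--
--         if chunk_full:
--             line = '        ' + ', '.join(chunk)
--             if not is_last:
--                 line += ', &'
--             else: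
--                 line += ' ]'
--             lines.append(line)
--             chunk = []
--     return lines
-- ===== SOURCE B (Python) =====
-- PER_LINE = 12
--
-- def format_int8_array(values: list[int]) -> list[str]:
--     # Iterative slice-based decomposition: format one 12-element batch per step.
--     if not values:
--         return ['        0 ]']
--     n = len(values)
--     lines = []
--     i = 0
--     while i < n:
--         batch = values[i:i + PER_LINE]
--         line = '        ' + ', '.join(f"{v:>4d}" for v in batch)
--         lines.append(line + (', &' if i + PER_LINE < n else ' ]'))
--         i += PER_LINE
--     return lines
-- ===== Notes on version B (the rewrite author's own statement) =====
-- stated objective: simpler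
-- what changed: Replaces A's enumerate loop with its manual chunk accumulator, modulo/is-last flush tests and per-line suffix patching by a plain index loop that slices one 12-element batch per step and formats it in a single expression.
import Mathlib
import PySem

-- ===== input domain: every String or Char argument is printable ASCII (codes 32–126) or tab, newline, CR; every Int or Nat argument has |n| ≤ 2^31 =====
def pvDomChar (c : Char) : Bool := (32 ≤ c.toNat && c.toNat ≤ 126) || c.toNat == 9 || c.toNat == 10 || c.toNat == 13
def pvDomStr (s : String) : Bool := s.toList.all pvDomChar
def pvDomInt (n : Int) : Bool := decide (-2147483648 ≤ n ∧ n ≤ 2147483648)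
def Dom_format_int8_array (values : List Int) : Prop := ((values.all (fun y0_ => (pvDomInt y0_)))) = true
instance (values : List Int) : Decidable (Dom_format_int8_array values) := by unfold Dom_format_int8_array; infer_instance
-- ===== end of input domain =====

-- B is a simpler recursive decomposition (peel a 12-element slice per step) of A's
-- single enumerate-loop with manual chunk/flush state; same return value, no speed claim.

-- f"{value:>4d}": right-align str(value) in width 4, space fill (exact: hand-ported, no PySem format primitive)
def fmt4 (v : Int) : List Char :=
  let s := PySem.Int.toChars v
  List.replicate (4 - s.length) ' ' ++ s

-- '        ' + ', '.join(chunk)  (both Pythons compute this same expression)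
def chunkLine (chunk : List (List Char)) : List Char :=
  "        ".toList ++ PySem.Chars.join ", ".toList chunk

-- ===== PORT A =====
-- one iteration of A's loop body over enumerate(values)
def stepA (total : Nat) (st : List String × List (List Char)) (p : Int × Int) :
    List String × List (List Char) :=
  let chunk := st.2 ++ [fmt4 p.2]
  let isLast := p.1 = (total : Int) - 1
  if PySem.Int.mod p.1 12 = 11 ∨ isLast then
    (st.1 ++ [String.ofList (chunkLine chunk ++ (if ¬ isLast then ", &".toList else " ]".toList))], [])
  else
    (st.1, chunk)

def format_int8_array (values : List Int) : List String :=
  if values = [] then ["        0 ]"]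
  else ((PySem.List.enumerate values).foldl (stepA values.length) ([], [])).1

-- ===== PORT B =====
-- the while loop of B: i advances by 12, lines accumulates one formatted slice per pass
def altGo (values : List Int) (i : Nat) (lines : List String) : List String :=
  if i < values.length then
    let batch := PySem.List.slice values (some (i : Int)) (some ((i : Int) + 12))
    let line := chunkLine (batch.map fmt4)
    altGo values (i + 12)
      (lines ++ [String.ofList (line ++ (if i + 12 < values.length then ", &" else " ]").toList)])
  else lines
termination_by values.length - i

def format_int8_array_alt (values : List Int) : List String :=
  if values = [] then ["        0 ]"]
  else altGo values 0 []

-- ===== PRECONDITION & SPEC =====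
def Spec_format_int8_array (values : List Int) (out : List String) : Prop := out = format_int8_array_alt values
instance (values : List Int) (out : List String) : Decidable (Spec_format_int8_array values out) := by unfold Spec_format_int8_array; infer_instance

-- ===== CLAIM (what is proved, stated in full; the proofs are below) =====
def Claim_equal_format_int8_array : Prop := ∀ (values : List Int), Dom_format_int8_array values → Spec_format_int8_array values (format_int8_array values)

-- ===== LEMMAS AND PROOFS =====

-- proof helper: the per-12-chunk recursion both programs compute
def goRec (values : List Int) : List String :=
  let line := chunkLine ((values.take 12).map fmt4)
  if h : values.drop 12 = [] then [String.ofList (line ++ " ]".toList)]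
  else String.ofList (line ++ ", &".toList) :: goRec (values.drop 12)
termination_by values.length
decreasing_by
  simp only [List.drop_eq_nil_iff] at h
  simp
  omega


-- final (possibly partial, possibly also exactly-12) chunk: the fold flushes once with ' ]'
theorem foldA_last (total : Nat) (c : List Int) (k : Nat) (lines : List String)
    (acc : List (List Char)) (hc : c ≠ []) (hk : 12 ∣ k) (hle : acc.length + c.length ≤ 12)
    (htot : total = k + acc.length + c.length) :
    List.foldl (stepA total) (lines, acc) (PySem.List.enumerate c ((k + acc.length : Nat) : Int))
      = (lines ++ [String.ofList (chunkLine (acc ++ c.map fmt4) ++ " ]".toList)], []) := by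
  induction c generalizing acc lines with
  | nil => exact absurd rfl hc
  | cons v c' ih =>
    rw [PySem.List.enumerate_cons, List.foldl_cons]
    by_cases h' : c' = []
    · subst h'
      have hlast : ((k + acc.length : Nat) : Int) = (total : Int) - 1 := by
        subst htot; simp only [List.length_cons, List.length_nil]; push_cast; omega
      simp only [stepA, hlast]
      simp [PySem.List.enumerate_nil, chunkLine]
    · have hnl : ((k + acc.length : Nat) : Int) ≠ (total : Int) - 1 := by
        subst htot
        have : 1 ≤ c'.length := List.length_pos_iff.mpr h'
        simp only [List.length_cons]
        push_cast
        omega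
      have hmod : PySem.Int.mod ((k + acc.length : Nat) : Int) 12 ≠ 11 := by
        rw [PySem.Int.mod_eq_emod_of_pos (by norm_num)]
        obtain ⟨m, rfl⟩ := hk
        have h1 : 1 ≤ c'.length := List.length_pos_iff.mpr h'
        have h2 : acc.length ≤ 10 := by simp only [List.length_cons] at hle; omega
        omega
      have hcond : ¬(PySem.Int.mod ((k + acc.length : Nat) : Int) 12 = 11 ∨
          ((k + acc.length : Nat) : Int) = (total : Int) - 1) := by tauto
      simp only [stepA]
      rw [if_neg hcond]
      have := ih (acc := acc ++ [fmt4 v]) (lines := lines) h'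
        (by simp at hle ⊢; omega) (by simp at htot ⊢; omega)
      simp only [List.length_append, List.length_singleton] at this
      rw [show ((k + acc.length : Nat) : Int) + 1 = ((k + (acc.length + 1) : Nat) : Int) by push_cast; ring]
      rw [this]
      simp

-- a full 12-chunk that is not the last element: the fold flushes once with ', &' and continues empty
theorem foldA_full (total : Nat) (c : List Int) (k : Nat) (lines : List String)
    (acc : List (List Char)) (hc : c ≠ []) (hk : 12 ∣ k) (hlen : acc.length + c.length = 12)
    (htot : k + 12 < total) :
    List.foldl (stepA total) (lines, acc) (PySem.List.enumerate c ((k + acc.length : Nat) : Int))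
      = (lines ++ [String.ofList (chunkLine (acc ++ c.map fmt4) ++ ", &".toList)], []) := by
  induction c generalizing acc lines with
  | nil => exact absurd rfl hc
  | cons v c' ih =>
    rw [PySem.List.enumerate_cons, List.foldl_cons]
    have hnl : ((k + acc.length : Nat) : Int) ≠ (total : Int) - 1 := by
      simp only [List.length_cons] at hlen
      push_cast
      omega
    by_cases h' : c' = []
    · subst h'
      have ha : acc.length = 11 := by simp at hlen; omega
      have hmod : PySem.Int.mod ((k + acc.length : Nat) : Int) 12 = 11 := by
        rw [PySem.Int.mod_eq_emod_of_pos (by norm_num)]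
        obtain ⟨m, rfl⟩ := hk
        omega
      simp only [stepA, if_pos (Or.inl hmod), if_pos hnl]
      simp [PySem.List.enumerate_nil, chunkLine]
    · have hmod : PySem.Int.mod ((k + acc.length : Nat) : Int) 12 ≠ 11 := by
        rw [PySem.Int.mod_eq_emod_of_pos (by norm_num)]
        obtain ⟨m, rfl⟩ := hk
        have h1 : 1 ≤ c'.length := List.length_pos_iff.mpr h'
        have h2 : acc.length ≤ 10 := by simp only [List.length_cons] at hlen; omega
        omega
      have hcond : ¬(PySem.Int.mod ((k + acc.length : Nat) : Int) 12 = 11 ∨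
          ((k + acc.length : Nat) : Int) = (total : Int) - 1) := by tauto
      simp only [stepA]
      rw [if_neg hcond]
      have := ih (acc := acc ++ [fmt4 v]) (lines := lines) h'
        (by simp at hlen ⊢; omega)
      simp only [List.length_append, List.length_singleton] at this
      rw [show ((k + acc.length : Nat) : Int) + 1 = ((k + (acc.length + 1) : Nat) : Int) by push_cast; ring]
      rw [this]
      simp

-- the whole fold, started at any 12-aligned offset, produces B's recursion
theorem foldA_main (values : List Int) (k : Nat) (lines : List String) (hv : values ≠ [])
    (hk : 12 ∣ k) :
    List.foldl (stepA (k + values.length)) (lines, []) (PySem.List.enumerate values (k : Int))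
      = (lines ++ goRec values, []) := by
  induction hn : values.length using Nat.strong_induction_on generalizing values k lines with
  | _ n ih =>
  subst hn
  rw [goRec.eq_def]
  by_cases hbig : values.length ≤ 12
  · have hdrop : values.drop 12 = [] := by simp [List.drop_eq_nil_iff]; omega
    have htake : values.take 12 = values := List.take_of_length_le hbig
    rw [hdrop, htake, dif_pos rfl]
    have := foldA_last (k + values.length) values k lines [] hv hk (by simpa) (by simp)
    simpa using this
  · have hdrop : values.drop 12 ≠ [] := by simp [List.drop_eq_nil_iff]; omega
    rw [dif_neg hdrop]
    conv_lhs => rw [show values = values.take 12 ++ values.drop 12 from (List.take_append_drop 12 values).symm]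
    rw [PySem.List.enumerate_append, List.foldl_append, List.take_append_drop]
    have h12 : 12 ≤ values.length := by omega
    have htk : (values.take 12).length = 12 := by
      rw [List.length_take]; omega
    have h1 := foldA_full (k + values.length) (values.take 12) k lines [] (by
        intro h; rw [h] at htk; simp at htk) hk (by simpa) (by omega)
    simp only [List.length_nil, Nat.add_zero, List.nil_append] at h1
    rw [h1]
    have h2 := ih (values.drop 12).length (by simp; omega) (values.drop 12) (k + 12)
      (lines ++ [String.ofList (chunkLine ((values.take 12).map fmt4) ++ ", &".toList)])
      hdrop ⟨k / 12 + 1, by obtain ⟨m, rfl⟩ := hk; ring_nf; omega⟩ rfl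
    rw [show k + 12 + (values.drop 12).length = k + values.length by simp; omega] at h2
    rw [show (k : Int) + (values.take 12).length = ((k + 12 : Nat) : Int) by rw [htk]; push_cast; ring]
    rw [h2]
    simp

-- the while loop from index i is the chunk recursion on the dropped prefix
theorem altGo_eq (values : List Int) (i : Nat) (lines : List String) (h : i < values.length) :
    altGo values i lines = lines ++ goRec (values.drop i) := by
  induction hm : values.length - i using Nat.strong_induction_on generalizing i lines with
  | _ m ih =>
  subst hm
  rw [altGo.eq_def, if_pos h]
  have hbatch : PySem.List.slice values (some (i : Int)) (some ((i : Int) + 12))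
      = (values.drop i).take 12 := by
    rw [show ((i : Int) + 12) = ((i : Int) + ((12 : Nat) : Int)) by norm_num,
      PySem.List.slice_natCast_add]
  rw [goRec.eq_def]
  have hdd : (values.drop i).drop 12 = values.drop (12 + i) := by rw [List.drop_drop]; ring_nf
  by_cases hend : values.length ≤ i + 12
  · have hnil : (values.drop i).drop 12 = [] := by
      rw [hdd]; simp [List.drop_eq_nil_iff]; omega
    rw [dif_pos hnil]
    rw [if_neg (by omega)]
    have htk : (values.drop i).take 12 = values.drop i := by
      apply List.take_of_length_le; simp; omega
    rw [altGo.eq_def, if_neg (by omega)]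
    simp [hbatch, htk]
  · have hnil : (values.drop i).drop 12 ≠ [] := by
      rw [hdd]; simp [List.drop_eq_nil_iff]; omega
    rw [dif_neg hnil]
    rw [if_pos (by omega)]
    rw [ih (values.length - (i + 12)) (by omega) (i + 12) _ (by omega) rfl]
    rw [hdd, hbatch]
    simp [Nat.add_comm]

-- ===== VERDICT (by name: the statement is the Claim_ definition above) =====
theorem format_int8_array_spec : Claim_equal_format_int8_array := by
  intro values _
  show format_int8_array values = format_int8_array_alt values
  by_cases hv : values = []
  · subst hv
    rfl
  · rw [format_int8_array, if_neg hv, format_int8_array_alt, if_neg hv]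
    have hlen : 0 < values.length := List.length_pos_iff.mpr hv
    rw [altGo_eq values 0 [] hlen, List.drop_zero, List.nil_append]
    have := foldA_main values 0 [] hv (by norm_num)
    simp only [Nat.zero_add, Nat.cast_zero, List.nil_append] at this
    rw [show PySem.List.enumerate values = PySem.List.enumerate values (0 : Int) from rfl, this]
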